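-- pv_equiv track=rewrite | github.com/plasmon360/pingala | vis1.py | pingala
-- ===== SOURCE A (Python) =====
-- def pingala(m, size=2):
--
--     if m < size:
--         return [[0] * m]
--     elif m == size:
--         return [[0] * size, [1] * size]
--     else:
--         result = []
--         seeds = [[0] * size]
--         seeds += [[0] * i + [1] * size for i in range(size)]
--         for seed in seeds:
--             for item in pingala(m - len(seed), size):
--                 if not len(seed + item) > m:
--                     result.append(seed + item)
--         return result
-- ===== SOURCE B (Python) =====
-- def pingala(m, size=2):
--     if m < size:
--         return [[0] * m]
--     if m == size:
--         return [[0] * size, [1] * size]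
--     seeds = [[0] * size] + [[0] * i + [1] * size for i in range(size)]
--     memo = {}
--     def solve(k):
--         if k in memo:
--             return memo[k]
--         if k < size:
--             res = [[0] * k]
--         elif k == size:
--             res = [[0] * size, [1] * size]
--         else:
--             res = [seed + item
--                    for seed in seeds if len(seed) <= k
--                    for item in solve(k - len(seed))]
--         memo[k] = res
--         return res
--     return solve(m)
-- ===== Notes on version B (the rewrite author's own statement) =====
-- stated objective: alternative
-- what changed: Replaces A's naive recursion (which re-solves pingala(k,size) repeatedly for the same k) with a top-down memoized solver that computes each subproblem once, hoists the seed list, and filters seeds by length instead of post-filtering results.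
import Mathlib
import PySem

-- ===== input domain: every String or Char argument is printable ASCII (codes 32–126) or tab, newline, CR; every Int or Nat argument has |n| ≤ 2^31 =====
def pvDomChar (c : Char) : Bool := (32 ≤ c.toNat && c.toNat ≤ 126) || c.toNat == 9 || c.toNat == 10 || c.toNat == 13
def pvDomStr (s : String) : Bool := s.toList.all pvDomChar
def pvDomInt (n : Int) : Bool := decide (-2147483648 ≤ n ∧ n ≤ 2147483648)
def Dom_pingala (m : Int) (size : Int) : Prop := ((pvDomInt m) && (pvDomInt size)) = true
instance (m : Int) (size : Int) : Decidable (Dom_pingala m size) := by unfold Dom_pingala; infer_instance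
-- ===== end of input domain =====

-- B replaces A's naive recursion by a top-down memoized solver (each subproblem solved once);
-- equivalence is proved on Pre_ (size ≥ 1, or m ≤ size).

-- ===== PORT A =====
-- Literal port of A's recursion; the Nat fuel only makes the recursion structurally terminating
-- (m.toNat + 1 always suffices on Pre_, where each recursive call strictly decreases m by ≥ size ≥ 1).
def pingalaFuel : Nat → Int → Int → List (List Int)
  | 0, _, _ => []
  | fuel + 1, m, size =>
    if m < size then [List.replicate m.toNat 0]
    else if m = size then [List.replicate size.toNat 0, List.replicate size.toNat 1]
    else
      let seeds := [List.replicate size.toNat 0] ++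
        (List.range size.toNat).map (fun i => List.replicate i 0 ++ List.replicate size.toNat 1)
      seeds.foldl (fun result seed =>
        (pingalaFuel fuel (m - (seed.length : Int)) size).foldl (fun result item =>
          if ¬ (((seed ++ item).length : Int) > m) then result ++ [seed ++ item] else result)
          result) []

def pingala (m : Int) (size : Int) : List (List Int) :=
  pingalaFuel (m.toNat + 1) m size

-- ===== PORT B =====
-- B-side helpers: the seed list (computed once, before any recursion) and the memoized solver.
def pvSeeds (size : Int) : List (List Int) :=
  [List.replicate size.toNat 0] ++
    (List.range size.toNat).map (fun i => List.replicate i 0 ++ List.replicate size.toNat 1)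

-- B's inner 'solve' with its memo dict threaded through; the Nat fuel only makes the recursion
-- structurally terminating (m.toNat + 1 always suffices on Pre_).
def pingala_alt_solve (size : Int) (seeds : List (List Int)) :
    Nat → Int → PySem.Dict Int (List (List Int)) →
      List (List Int) × PySem.Dict Int (List (List Int))
  | 0, _, memo => ([], memo)
  | fuel + 1, k, memo =>
    match memo.get? k with
    | some res => (res, memo)
    | none =>
      if k < size then
        let res := [List.replicate k.toNat 0]
        (res, memo.insert k res)
      else if k = size then
        let res := [List.replicate size.toNat 0, List.replicate size.toNat 1]
        (res, memo.insert k res)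
      else
        let r := seeds.foldl
          (fun (acc : List (List Int) × PySem.Dict Int (List (List Int))) seed =>
            if (seed.length : Int) ≤ k then
              let sub := pingala_alt_solve size seeds fuel (k - (seed.length : Int)) acc.2
              (acc.1 ++ sub.1.map (fun item => seed ++ item), sub.2)
            else acc)
          (([] : List (List Int)), memo)
        (r.1, r.2.insert k r.1)

def pingala_alt (m : Int) (size : Int) : List (List Int) :=
  if m < size then [List.replicate m.toNat 0]
  else if m = size then [List.replicate size.toNat 0, List.replicate size.toNat 1]
  else (pingala_alt_solve size (pvSeeds size) (m.toNat + 1) m PySem.Dict.empty).1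

-- ===== PRECONDITION & SPEC =====
-- Pre_ excludes size ≤ 0 with m > size, where A recurses without progress and raises RecursionError.
def Pre_pingala (m : Int) (size : Int) : Prop := 1 ≤ size ∨ m ≤ size
instance (m : Int) (size : Int) : Decidable (Pre_pingala m size) := by unfold Pre_pingala; infer_instance
def pvWitness_pingala : Int × Int := (7, 2)

def Spec_pingala (m : Int) (size : Int) (out : List (List Int)) : Prop := out = pingala_alt m size
instance (m : Int) (size : Int) (out : List (List Int)) : Decidable (Spec_pingala m size out) := by unfold Spec_pingala; infer_instance

-- ===== CLAIM (what is proved, stated in full; the proofs are below) =====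
def Claim_equal_pingala : Prop := ∀ (m : Int) (size : Int), Dom_pingala m size → Pre_pingala m size → Spec_pingala m size (pingala m size)

-- ===== LEMMAS AND PROOFS =====

-- branch lemmas for the A port
theorem pingalaFuel_lt (fuel : Nat) (m size : Int) (h : m < size) :
    pingalaFuel (fuel + 1) m size = [List.replicate m.toNat 0] := by
  simp only [pingalaFuel, if_pos h]

theorem pingalaFuel_eq (fuel : Nat) (m size : Int) (h1 : ¬ m < size) (h2 : m = size) :
    pingalaFuel (fuel + 1) m size =
      [List.replicate size.toNat 0, List.replicate size.toNat 1] := by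
  simp only [pingalaFuel, if_neg h1, if_pos h2]

-- A's nested appending folds, flattened to a flatMap of filters
theorem foldl_inner (seed : List Int) (c : List Int → Prop) [DecidablePred c] :
    ∀ (P : List (List Int)) (acc : List (List Int)),
      P.foldl (fun r item => if c item then r ++ [seed ++ item] else r) acc =
        acc ++ (P.filter (fun item => decide (c item))).map (fun item => seed ++ item) := by
  intro P
  induction P with
  | nil => intro acc; simp
  | cons x xs ih =>
    intro acc
    by_cases hc : c x <;> simp [hc, ih]

theorem foldl_nested (c : List Int → List Int → Prop) [inst : ∀ s i, Decidable (c s i)]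
    (g : List Int → List (List Int)) :
    ∀ (L : List (List Int)) (acc : List (List Int)),
      L.foldl (fun result seed =>
          (g seed).foldl (fun r item => if c seed item then r ++ [seed ++ item] else r) result)
        acc =
      acc ++ L.flatMap (fun seed =>
        ((g seed).filter (fun item => decide (c seed item))).map (fun item => seed ++ item)) := by
  intro L
  induction L with
  | nil => intro acc; simp
  | cons x xs ih =>
    intro acc
    simp only [List.foldl_cons, List.flatMap_cons, ih, foldl_inner x (c x)]
    simp [List.append_assoc]

theorem pingalaFuel_succ_of_lt (fuel : Nat) (m size : Int) (h : size < m) :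
    pingalaFuel (fuel + 1) m size =
      (pvSeeds size).flatMap (fun seed =>
        ((pingalaFuel fuel (m - (seed.length : Int)) size).filter
          (fun item => decide (¬ (((seed ++ item).length : Int) > m)))).map
          (fun item => seed ++ item)) := by
  have h1 : ¬ m < size := by omega
  have h2 : ¬ m = size := by omega
  simp only [pingalaFuel, if_neg h1, if_neg h2]
  exact (foldl_nested (fun seed item => ¬ (((seed ++ item).length : Int) > m))
    (fun seed => pingalaFuel fuel (m - (seed.length : Int)) size) _ []).trans (by simp [pvSeeds])

theorem pvSeeds_len (size : Int) : ∀ s ∈ pvSeeds size, size.toNat ≤ s.length := by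
  intro s hs
  simp only [pvSeeds, List.cons_append, List.nil_append, List.mem_cons, List.mem_map,
    List.mem_range] at hs
  rcases hs with rfl | ⟨i, _, rfl⟩
  · simp
  · simp

-- On Pre_, every element of pingalaFuel fuel m size (0 ≤ m < fuel) has length exactly m.
theorem pingalaFuel_len (size : Int) (hs : 1 ≤ size) :
    ∀ (fuel : Nat) (m : Int), 0 ≤ m → m < (fuel : Int) →
      ∀ item ∈ pingalaFuel fuel m size, (item.length : Int) = m := by
  intro fuel
  induction fuel with
  | zero => intro m h0 hf; omega
  | succ f ih =>
    intro m h0 hf item hitem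
    by_cases hlt : m < size
    · rw [pingalaFuel_lt f m size hlt] at hitem
      simp only [List.mem_singleton] at hitem
      subst hitem; simp; omega
    · by_cases heq : m = size
      · rw [pingalaFuel_eq f m size hlt heq] at hitem
        simp only [List.mem_cons, List.not_mem_nil, or_false] at hitem
        rcases hitem with rfl | rfl <;> simp <;> omega
      · have hgt : size < m := by omega
        rw [pingalaFuel_succ_of_lt f m size hgt] at hitem
        simp only [List.mem_flatMap, List.mem_map, List.mem_filter] at hitem
        obtain ⟨seed, hseed, item', ⟨hmem, hfilt⟩, rfl⟩ := hitem
        have hsl : size.toNat ≤ seed.length := pvSeeds_len size seed hseed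
        have hsl1 : (1 : Int) ≤ (seed.length : Int) := by omega
        have hle : ((seed ++ item').length : Int) ≤ m := by
          simp only [decide_eq_true_eq, not_lt] at hfilt; exact_mod_cast hfilt
        by_cases hnn : 0 ≤ m - (seed.length : Int)
        · have hlen := ih (m - (seed.length : Int)) hnn (by omega) item' hmem
          simp only [List.length_append] at hle ⊢
          push_cast at hlen ⊢
          omega
        · -- m - len(seed) < 0 : the recursive value is [[]], and [] is filtered out
          obtain ⟨f', rfl⟩ : ∃ f', f = f' + 1 := ⟨f - 1, by omega⟩
          rw [pingalaFuel_lt f' (m - (seed.length : Int)) size (by omega)] at hmem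
          simp only [List.mem_singleton] at hmem
          subst hmem
          rw [show (m - (seed.length : Int)).toNat = 0 by omega] at hle
          simp at hle
          omega

-- Result is independent of the fuel, as long as it is positive and exceeds m.
theorem pingalaFuel_irrel (size : Int) (hs : 1 ≤ size) :
    ∀ (fuel fuel' : Nat) (m : Int), 1 ≤ fuel → 1 ≤ fuel' → m < (fuel : Int) → m < (fuel' : Int) →
      pingalaFuel fuel m size = pingalaFuel fuel' m size := by
  intro fuel
  induction fuel with
  | zero => intro fuel' m h1; omega
  | succ f ih =>
    intro fuel' m _ h1' hf hf'
    obtain ⟨f', rfl⟩ : ∃ f', fuel' = f' + 1 := ⟨fuel' - 1, by omega⟩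
    by_cases hlt : m < size
    · rw [pingalaFuel_lt f m size hlt, pingalaFuel_lt f' m size hlt]
    · by_cases heq : m = size
      · rw [pingalaFuel_eq f m size hlt heq, pingalaFuel_eq f' m size hlt heq]
      · have hgt : size < m := by omega
        rw [pingalaFuel_succ_of_lt f m size hgt, pingalaFuel_succ_of_lt f' m size hgt]
        apply List.flatMap_congr
        intro seed hseed
        have hsl : size.toNat ≤ seed.length := pvSeeds_len size seed hseed
        rw [ih f' (m - (seed.length : Int)) (by omega) (by omega) (by omega) (by omega)]

-- memo invariant: every memo entry is A's value for its key
def MemoOK (size : Int) (memo : PySem.Dict Int (List (List Int))) : Prop :=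
  ∀ (k : Int) (res : List (List Int)), memo.get? k = some res →
    res = pingalaFuel (k.toNat + 1) k size

theorem memoOK_empty (size : Int) : MemoOK size PySem.Dict.empty := by
  intro k res h
  simp [PySem.Dict.get?_empty] at h

theorem memoOK_insert (size : Int) (memo : PySem.Dict Int (List (List Int)))
    (h : MemoOK size memo) (k : Int) (res : List (List Int))
    (hres : res = pingalaFuel (k.toNat + 1) k size) :
    MemoOK size (memo.insert k res) := by
  intro k' res' h'
  rw [PySem.Dict.get?_insert] at h'
  by_cases hk : k' = k
  · rw [if_pos hk] at h'
    cases h'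
    subst hk; exact hres
  · rw [if_neg hk] at h'
    exact h k' res' h'

-- Correctness of B's memoized solver: it returns A's value and preserves the memo invariant.
theorem solve_correct (size : Int) (hs : 1 ≤ size) :
    ∀ (fuel : Nat) (k : Int) (memo : PySem.Dict Int (List (List Int))),
      1 ≤ fuel → k < (fuel : Int) → MemoOK size memo →
      (pingala_alt_solve size (pvSeeds size) fuel k memo).1 = pingalaFuel (k.toNat + 1) k size ∧
      MemoOK size (pingala_alt_solve size (pvSeeds size) fuel k memo).2 := by
  intro fuel
  induction fuel with
  | zero => intro k memo h1; omega
  | succ f ih =>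
    intro k memo _ hk hmemo
    show (match PySem.Dict.get? memo k with
      | some res => (res, memo)
      | none => _).1 = _ ∧ MemoOK size (match PySem.Dict.get? memo k with
      | some res => (res, memo)
      | none => _).2
    cases hget : PySem.Dict.get? memo k with
    | some res =>
      simp only []
      exact ⟨hmemo k res hget, hmemo⟩
    | none =>
      by_cases hlt : k < size
      · simp only [if_pos hlt]
        refine ⟨(pingalaFuel_lt k.toNat k size hlt).symm, ?_⟩
        exact memoOK_insert size memo hmemo k _ (pingalaFuel_lt k.toNat k size hlt).symm
      · by_cases heq : k = size
        · simp only [if_neg hlt, if_pos heq]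
          refine ⟨(pingalaFuel_eq k.toNat k size hlt heq).symm, ?_⟩
          exact memoOK_insert size memo hmemo k _ (pingalaFuel_eq k.toNat k size hlt heq).symm
        · have hgt : size < k := by omega
          have hk2 : 2 ≤ k := by omega
          have hf2 : 2 ≤ f := by omega
          -- the fold over the seeds
          have hfold : ∀ (L : List (List Int)), (∀ s ∈ L, size.toNat ≤ s.length) →
              ∀ (acc1 : List (List Int)) (memo0 : PySem.Dict Int (List (List Int))),
              MemoOK size memo0 →
              (L.foldl (fun (acc : List (List Int) × PySem.Dict Int (List (List Int))) seed =>
                  if (seed.length : Int) ≤ k then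
                    let sub := pingala_alt_solve size (pvSeeds size) f
                      (k - (seed.length : Int)) acc.2
                    (acc.1 ++ sub.1.map (fun item => seed ++ item), sub.2)
                  else acc) (acc1, memo0)).1 =
                acc1 ++ L.flatMap (fun seed =>
                  if (seed.length : Int) ≤ k then
                    (pingalaFuel ((k - (seed.length : Int)).toNat + 1)
                      (k - (seed.length : Int)) size).map (fun item => seed ++ item)
                  else []) ∧
              MemoOK size (L.foldl (fun (acc : List (List Int) × PySem.Dict Int (List (List Int))) seed =>
                  if (seed.length : Int) ≤ k then
                    let sub := pingala_alt_solve size (pvSeeds size) f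
                      (k - (seed.length : Int)) acc.2
                    (acc.1 ++ sub.1.map (fun item => seed ++ item), sub.2)
                  else acc) (acc1, memo0)).2 := by
            intro L
            induction L with
            | nil => intro _ acc1 memo0 hm0; exact ⟨by simp, hm0⟩
            | cons x xs ihL =>
              intro hLen acc1 memo0 hm0
              have hx : size.toNat ≤ x.length := hLen x (List.mem_cons_self)
              have hxs : ∀ s ∈ xs, size.toNat ≤ s.length :=
                fun s hsm => hLen s (List.mem_cons_of_mem x hsm)
              simp only [List.foldl_cons, List.flatMap_cons]
              by_cases hxle : (x.length : Int) ≤ k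
              · have hsub := ih (k - (x.length : Int)) memo0 (by omega) (by omega) hm0
                rw [if_pos hxle]
                have := ihL hxs
                  (acc1 ++ ((pingala_alt_solve size (pvSeeds size) f
                    (k - (x.length : Int)) memo0).1).map (fun item => x ++ item))
                  (pingala_alt_solve size (pvSeeds size) f (k - (x.length : Int)) memo0).2
                  hsub.2
                rw [if_pos hxle]
                refine ⟨?_, this.2⟩
                rw [this.1, hsub.1]
                simp [List.append_assoc]
              · rw [if_neg hxle, if_neg hxle]
                have := ihL hxs acc1 memo0 hm0
                refine ⟨by rw [this.1]; simp, this.2⟩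
          have hmain := hfold (pvSeeds size) (pvSeeds_len size) [] memo hmemo
          simp only [if_neg hlt, if_neg heq]
          constructor
          · rw [hmain.1]
            obtain ⟨t, ht⟩ : ∃ t, k.toNat = t + 1 := ⟨k.toNat - 1, by omega⟩
            rw [show k.toNat + 1 = (t + 1) + 1 by omega,
              pingalaFuel_succ_of_lt (t + 1) k size hgt, ← ht]
            simp only [List.nil_append]
            apply List.flatMap_congr
            intro seed hseed
            have hsl : size.toNat ≤ seed.length := pvSeeds_len size seed hseed
            have hsl1 : (1 : Int) ≤ (seed.length : Int) := by omega
            by_cases hle : (seed.length : Int) ≤ k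
            · rw [if_pos hle]
              rw [pingalaFuel_irrel size hs ((k - (seed.length : Int)).toNat + 1) k.toNat
                (k - (seed.length : Int)) (by omega) (by omega) (by omega) (by omega)]
              congr 1
              refine (List.filter_eq_self.2 ?_).symm
              intro item hitem
              have hlen := pingalaFuel_len size hs k.toNat (k - (seed.length : Int))
                (by omega) (by omega) item hitem
              simp only [decide_eq_true_eq, not_lt, List.length_append]
              push_cast at hlen
              omega
            · rw [if_neg hle]
              -- seed longer than k : A's recursive value is [[]] and it is filtered out
              obtain ⟨f2, hf2eq⟩ : ∃ f2, k.toNat = f2 + 1 := ⟨k.toNat - 1, by omega⟩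
              rw [hf2eq, pingalaFuel_lt f2 _ size (by omega)]
              rw [show (k - (seed.length : Int)).toNat = 0 by omega]
              simp only [List.replicate_zero, List.filter_cons, List.filter_nil,
                List.append_nil]
              rw [decide_eq_false (by omega : ¬ ¬ ((seed.length : Int) > k))]
              simp
          · exact memoOK_insert size _ hmain.2 k _ (by
              rw [hmain.1]
              obtain ⟨t, ht⟩ : ∃ t, k.toNat = t + 1 := ⟨k.toNat - 1, by omega⟩
              rw [show k.toNat + 1 = (t + 1) + 1 by omega,
                pingalaFuel_succ_of_lt (t + 1) k size hgt, ← ht]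
              simp only [List.nil_append]
              apply List.flatMap_congr
              intro seed hseed
              have hsl : size.toNat ≤ seed.length := pvSeeds_len size seed hseed
              have hsl1 : (1 : Int) ≤ (seed.length : Int) := by omega
              by_cases hle : (seed.length : Int) ≤ k
              · rw [if_pos hle]
                rw [pingalaFuel_irrel size hs ((k - (seed.length : Int)).toNat + 1) k.toNat
                  (k - (seed.length : Int)) (by omega) (by omega) (by omega) (by omega)]
                congr 1
                refine (List.filter_eq_self.2 ?_).symm
                intro item hitem
                have hlen := pingalaFuel_len size hs k.toNat (k - (seed.length : Int))
                  (by omega) (by omega) item hitem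
                simp only [decide_eq_true_eq, not_lt, List.length_append]
                push_cast at hlen ⊢
                omega
              · rw [if_neg hle]
                obtain ⟨f2, hf2eq⟩ : ∃ f2, k.toNat = f2 + 1 := ⟨k.toNat - 1, by omega⟩
                rw [hf2eq, pingalaFuel_lt f2 _ size (by omega)]
                rw [show (k - (seed.length : Int)).toNat = 0 by omega]
                simp only [List.replicate_zero, List.filter_cons, List.filter_nil,
                  List.append_nil]
                rw [decide_eq_false (by omega : ¬ ¬ ((seed.length : Int) > k))]
                simp)

-- ===== VERDICT (by name: the statement is the Claim_ definition above) =====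
theorem pingala_spec : Claim_equal_pingala := by
  intro m size _ hpre
  unfold Spec_pingala pingala pingala_alt
  by_cases hlt : m < size
  · rw [pingalaFuel_lt m.toNat m size hlt, if_pos hlt]
  · by_cases heq : m = size
    · rw [pingalaFuel_eq m.toNat m size hlt heq, if_neg hlt, if_pos heq]
    · have hgt : size < m := by omega
      have hs : 1 ≤ size := by rcases hpre with h | h <;> omega
      simp only [if_neg hlt, if_neg heq]
      exact ((solve_correct size hs (m.toNat + 1) m PySem.Dict.empty (by omega)
        (by omega) (memoOK_empty size)).1).symm
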